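-- pv_equiv track=rewrite | github.com/jewelldmnt/Number-Guessing-Game | main.py | clues
-- ===== SOURCE A (Python) =====
-- def clues(user_input, sn):
--     clues = []
--
--     for idx, num in enumerate(sn):
--         if num == user_input[idx]:
--             clues.append("Ichi")
--         elif num in user_input:
--             clues.append("Chigau")
--
--     if len(clues) == 0:
--         return "Numreals"
--     else:
--         clues.sort()
--
--     return ' '.join(clues)
-- ===== SOURCE B (Python) =====
-- def clues(user_input, sn):
--     pairs = list(zip(sn, user_input))
--     ichi = sum(1 for s, g in pairs if s == g)
--     chigau = sum(1 for s, g in pairs if s != g and s in user_input)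
--     if ichi + chigau == 0:
--         return "Numreals"
--     return ' '.join(['Chigau'] * chigau + ['Ichi'] * ichi)
-- ===== Notes on version B (the rewrite author's own statement) =====
-- stated objective: simpler
-- what changed: Replaces the index-driven append-then-sort loop by zipping sn with user_input, counting matches/presences with two countP-style comprehensions, and emitting the already-sorted 'Chigau'*k + 'Ichi'*m string directly, eliminating both the explicit indexing and the sort.
import Mathlib
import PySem

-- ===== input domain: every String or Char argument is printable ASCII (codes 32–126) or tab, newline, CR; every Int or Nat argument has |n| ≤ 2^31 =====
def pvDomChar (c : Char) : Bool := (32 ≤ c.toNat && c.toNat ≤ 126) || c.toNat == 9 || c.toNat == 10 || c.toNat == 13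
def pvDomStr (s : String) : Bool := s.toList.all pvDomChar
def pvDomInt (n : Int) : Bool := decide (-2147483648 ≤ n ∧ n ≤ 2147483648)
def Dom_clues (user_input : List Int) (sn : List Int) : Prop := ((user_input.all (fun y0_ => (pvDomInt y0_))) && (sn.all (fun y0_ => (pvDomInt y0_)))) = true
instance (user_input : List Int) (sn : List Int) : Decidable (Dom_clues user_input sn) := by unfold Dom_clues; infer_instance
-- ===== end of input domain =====

-- B zips sn with user_input, counts matches/presences with two countP passes, and emits
-- the already-sorted "Chigau"*k ++ "Ichi"*m string, removing A's indexing and its sort; objective: simpler.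

-- ===== PORT A =====
-- A's for-loop over enumerate(sn), appending "Ichi"/"Chigau" to the clues list.
def cluesLoopA (user_input : List Int) : List (Int × Int) → List String → List String
  | [], acc => acc
  | (idx, num) :: rest, acc =>
      if num == PySem.List.pyGetD user_input idx 0 then
        cluesLoopA user_input rest (acc ++ ["Ichi"])
      else if user_input.contains num then
        cluesLoopA user_input rest (acc ++ ["Chigau"])
      else
        cluesLoopA user_input rest acc

def clues (user_input : List Int) (sn : List Int) : String :=
  let cl := cluesLoopA user_input (PySem.List.enumerate sn 0) []
  if cl.length = 0 then "Numreals"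
  else PySem.Str.join " " (PySem.List.sorted cl (fun x => x) false)

-- ===== PORT B =====
def clues_alt (user_input : List Int) (sn : List Int) : String :=
  let pairs := sn.zip user_input
  let ichi := pairs.countP (fun p => p.1 == p.2)
  let chigau := pairs.countP (fun p => p.1 != p.2 && user_input.contains p.1)
  if ichi + chigau = 0 then "Numreals"
  else PySem.Str.join " " (List.replicate chigau "Chigau" ++ List.replicate ichi "Ichi")

-- ===== PRECONDITION & SPEC =====
-- Pre_ excludes inputs with len(sn) > len(user_input), on which A's user_input[idx]
-- raises IndexError.
def Pre_clues (user_input : List Int) (sn : List Int) : Prop := sn.length ≤ user_input.length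
instance (user_input : List Int) (sn : List Int) : Decidable (Pre_clues user_input sn) := by unfold Pre_clues; infer_instance

def pvWitness_clues : List Int × List Int := ([1, 2, 3], [1, 3, 2])

def Spec_clues (user_input : List Int) (sn : List Int) (out : String) : Prop := out = clues_alt user_input sn
instance (user_input : List Int) (sn : List Int) (out : String) : Decidable (Spec_clues user_input sn out) := by unfold Spec_clues; infer_instance

-- ===== CLAIM (what is proved, stated in full; the proofs are below) =====
def Claim_equal_clues : Prop := ∀ (user_input : List Int) (sn : List Int), Dom_clues user_input sn → Pre_clues user_input sn → Spec_clues user_input sn (clues user_input sn)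

-- ===== LEMMAS AND PROOFS =====

-- A's loop only appends: factor out the accumulator.
theorem cluesLoopA_acc (u : List Int) (l : List (Int × Int)) (acc : List String) :
    cluesLoopA u l acc = acc ++ cluesLoopA u l [] := by
  induction l generalizing acc with
  | nil => simp [cluesLoopA]
  | cons p rest ih =>
      obtain ⟨idx, num⟩ := p
      simp only [cluesLoopA]
      split_ifs with h1 h2
      · rw [ih (acc ++ ["Ichi"]), ih ([] ++ ["Ichi"])]; simp
      · rw [ih (acc ++ ["Chigau"]), ih ([] ++ ["Chigau"])]; simp
      · exact ih acc

-- Under Pre_, A's loop over enumerate(sn, k) is a flatMap over sn.zip (u.drop k).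
theorem cluesLoopA_zip (u : List Int) : ∀ (sn : List Int) (k : Nat), k + sn.length ≤ u.length →
    cluesLoopA u (PySem.List.enumerate sn (k : Int)) [] =
      (sn.zip (u.drop k)).flatMap
        (fun p => if p.1 = p.2 then ["Ichi"] else if u.contains p.1 then ["Chigau"] else []) := by
  intro sn
  induction sn with
  | nil => intro k _; simp [PySem.List.enumerate, cluesLoopA]
  | cons x rest ih =>
      intro k hk
      have hklen : k < u.length := by simp at hk; omega
      have hdrop : u.drop k = u[k] :: u.drop (k + 1) := List.drop_eq_getElem_cons hklen
      have hget : PySem.List.pyGetD u (k : Int) 0 = u[k] := by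
        rw [PySem.List.pyGetD_natCast]; exact List.getD_eq_getElem u 0 hklen
      have hk1 : ((k : Int) + 1) = ((k + 1 : Nat) : Int) := by push_cast; ring
      have hrest : k + 1 + rest.length ≤ u.length := by simp at hk; omega
      rw [PySem.List.enumerate_cons]
      by_cases h1 : x = u[k]
      · simp only [cluesLoopA, hget, h1, BEq.rfl, if_true]
        rw [cluesLoopA_acc, hk1, ih (k + 1) hrest,
            hdrop, List.zip_cons_cons, List.flatMap_cons]
        simp
      · have hbeq : (x == u[k]) = false := beq_eq_false_iff_ne.mpr h1
        by_cases h2 : x ∈ u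
        · have h2' : u.contains x = true := by simpa using h2
          simp only [cluesLoopA, hget, hbeq, Bool.false_eq_true, if_false, h2', if_true]
          rw [cluesLoopA_acc, hk1, ih (k + 1) hrest,
              hdrop, List.zip_cons_cons, List.flatMap_cons]
          simp [h1, h2]
        · have h2' : u.contains x = false := by simpa using h2
          simp only [cluesLoopA, hget, hbeq, h2', Bool.false_eq_true, if_false]
          rw [hk1, ih (k + 1) hrest,
              hdrop, List.zip_cons_cons, List.flatMap_cons]
          simp [h1, h2]

-- counts of the flatMap form are B's countP counters
theorem count_flatMap_ichi (u : List Int) (l : List (Int × Int)) :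
    ((l.flatMap (fun p => if p.1 = p.2 then ["Ichi"] else if u.contains p.1 then ["Chigau"] else [])).count "Ichi")
      = l.countP (fun p => p.1 == p.2) := by
  have c1 : (["Chigau"] : List String).count "Ichi" = 0 := by decide
  induction l with
  | nil => simp
  | cons p rest ih =>
      simp only [List.flatMap_cons, List.count_append, List.countP_cons, ih]
      by_cases h1 : p.1 = p.2
      · simp [h1, Nat.add_comm]
      · by_cases h2 : p.1 ∈ u
        · simp [h1, h2, c1]
        · simp [h1, h2]

theorem count_flatMap_chigau (u : List Int) (l : List (Int × Int)) :
    ((l.flatMap (fun p => if p.1 = p.2 then ["Ichi"] else if u.contains p.1 then ["Chigau"] else [])).count "Chigau")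
      = l.countP (fun p => p.1 != p.2 && u.contains p.1) := by
  have c2 : (["Ichi"] : List String).count "Chigau" = 0 := by decide
  induction l with
  | nil => simp
  | cons p rest ih =>
      simp only [List.flatMap_cons, List.count_append, List.countP_cons, ih]
      by_cases h1 : p.1 = p.2
      · simp [h1, c2, bne_self_eq_false]
      · by_cases h2 : p.1 ∈ u
        · simp [h1, h2, bne_iff_ne, Nat.add_comm]
        · simp [h1, h2]

-- every element of A's list is "Ichi" or "Chigau"
theorem cluesLoopA_mem (u : List Int) (l : List (Int × Int)) :
    ∀ x ∈ cluesLoopA u l [], x = "Ichi" ∨ x = "Chigau" := by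
  induction l with
  | nil => simp [cluesLoopA]
  | cons p rest ih =>
      obtain ⟨idx, num⟩ := p
      simp only [cluesLoopA]
      split_ifs with h1 h2
      · rw [cluesLoopA_acc u rest ([] ++ ["Ichi"])]
        intro x hx
        rcases List.mem_append.mp hx with h | h
        · left; simpa using h
        · exact ih x h
      · rw [cluesLoopA_acc u rest ([] ++ ["Chigau"])]
        intro x hx
        rcases List.mem_append.mp hx with h | h
        · right; simpa using h
        · exact ih x h
      · exact ih

-- a list over {"Chigau","Ichi"} is a permutation of its Chigau-block ++ Ichi-block
theorem perm_blocks (l : List String) (h : ∀ x ∈ l, x = "Ichi" ∨ x = "Chigau") :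
    (List.replicate (l.count "Chigau") "Chigau" ++ List.replicate (l.count "Ichi") "Ichi").Perm l := by
  induction l with
  | nil => simp
  | cons a t ih =>
      have ht : ∀ x ∈ t, x = "Ichi" ∨ x = "Chigau" := fun x hx => h x (List.mem_cons_of_mem a hx)
      rcases h a (List.mem_cons_self) with ha | ha
      · subst ha
        have hne : ("Ichi" : String) ≠ "Chigau" := by decide
        rw [List.count_cons_self, List.count_cons_of_ne hne, List.replicate_succ']
        have h1 : (List.replicate (t.count "Chigau") "Chigau" ++ (List.replicate (t.count "Ichi") "Ichi" ++ ["Ichi"])).Perm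
            ("Ichi" :: (List.replicate (t.count "Chigau") "Chigau" ++ List.replicate (t.count "Ichi") "Ichi")) := by
          rw [← List.append_assoc]
          exact List.perm_append_singleton _ _
        exact h1.trans ((ih ht).cons _)
      · subst ha
        have hne : ("Chigau" : String) ≠ "Ichi" := by decide
        rw [List.count_cons_self, List.count_cons_of_ne hne, List.replicate_succ]
        exact (ih ht).cons _

-- the blocks are sorted (Pairwise ≤)
theorem blocks_pairwise (m n : Nat) :
    (List.replicate m "Chigau" ++ List.replicate n "Ichi").Pairwise (fun a b : String => a ≤ b) := by
  apply List.pairwise_append.mpr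
  refine ⟨?_, ?_, ?_⟩
  · exact List.pairwise_replicate.mpr (Or.inr (le_refl _))
  · exact List.pairwise_replicate.mpr (Or.inr (le_refl _))
  · intro x hx y hy
    rw [List.eq_of_mem_replicate hx, List.eq_of_mem_replicate hy]
    exact le_of_lt (by rw [String.lt_iff_toList_lt]; decide)

-- sorting A's list yields exactly the two blocks
theorem sorted_blocks (l : List String) (h : ∀ x ∈ l, x = "Ichi" ∨ x = "Chigau") :
    PySem.List.sorted l (fun x => x) false
      = List.replicate (l.count "Chigau") "Chigau" ++ List.replicate (l.count "Ichi") "Ichi" :=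
  PySem.List.sorted_id_eq_of_perm_of_pairwise _ _ (perm_blocks l h) (blocks_pairwise _ _)

-- the two counts exhaust the list
theorem counts_length (l : List String) (h : ∀ x ∈ l, x = "Ichi" ∨ x = "Chigau") :
    l.count "Ichi" + l.count "Chigau" = l.length := by
  induction l with
  | nil => simp
  | cons a t ih =>
      have ht : ∀ x ∈ t, x = "Ichi" ∨ x = "Chigau" := fun x hx => h x (List.mem_cons_of_mem a hx)
      rcases h a (List.mem_cons_self) with ha | ha
      · subst ha
        rw [List.count_cons_self, List.count_cons_of_ne (by decide : ("Ichi" : String) ≠ "Chigau")]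
        have := ih ht; simp; omega
      · subst ha
        rw [List.count_cons_self, List.count_cons_of_ne (by decide : ("Chigau" : String) ≠ "Ichi")]
        have := ih ht; simp; omega

-- ===== VERDICT (by name: the statement is the Claim_ definition above) =====
theorem clues_spec : Claim_equal_clues := by
  intro u sn _ hpre
  unfold Spec_clues clues clues_alt
  set cl := cluesLoopA u (PySem.List.enumerate sn 0) [] with hcl
  have hmem := cluesLoopA_mem u (PySem.List.enumerate sn 0)
  rw [← hcl] at hmem
  have hzip : cl = (sn.zip u).flatMap
      (fun p => if p.1 = p.2 then ["Ichi"] else if u.contains p.1 then ["Chigau"] else []) := by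
    rw [hcl]
    have := cluesLoopA_zip u sn 0 (by simpa using hpre)
    simpa using this
  have hI : cl.count "Ichi" = (sn.zip u).countP (fun p => p.1 == p.2) := by
    rw [hzip]; exact count_flatMap_ichi u _
  have hC : cl.count "Chigau" = (sn.zip u).countP (fun p => p.1 != p.2 && u.contains p.1) := by
    rw [hzip]; exact count_flatMap_chigau u _
  have hlen := counts_length cl hmem
  by_cases hz : cl.length = 0
  · have h0 : (sn.zip u).countP (fun p => p.1 == p.2) + (sn.zip u).countP (fun p => p.1 != p.2 && u.contains p.1) = 0 := by
      omega
    rw [if_pos hz, if_pos h0]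
  · have hnz : ¬ ((sn.zip u).countP (fun p => p.1 == p.2) + (sn.zip u).countP (fun p => p.1 != p.2 && u.contains p.1) = 0) := by
      omega
    rw [if_neg hz, if_neg hnz, sorted_blocks cl hmem, hI, hC]
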